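-- pv_equiv track=rewrite | github.com/AnkJung/BTL | BaiTapLon_Python/ProjectPygame_XayDungTroChoiRan.py | unwrap_points
-- ===== SOURCE A (Python) =====
-- def unwrap_points(points, width_px, height_px):
--     # Điều chỉnh các điểm liên tiếp để khoảng cách ngắn nhất, tính theo wrap
--     if not points:
--         return points
--     unwrapped = [points[0]]
--     ox, oy = 0, 0  # offset tích lũy
--     for i in range(1, len(points)):
--         x0, y0 = unwrapped[-1]
--         x1, y1 = points[i]
--         # thử các dịch chuyển theo bề rộng/chiều cao để chọn khoảng cách ngắn nhất
--         candidates = [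
--             (x1 + ox,         y1 + oy),
--             (x1 + ox + width_px,  y1 + oy),
--             (x1 + ox - width_px,  y1 + oy),
--             (x1 + ox,         y1 + oy + height_px),
--             (x1 + ox,         y1 + oy - height_px),
--             (x1 + ox + width_px,  y1 + oy + height_px),
--             (x1 + ox - width_px,  y1 + oy + height_px),
--             (x1 + ox + width_px,  y1 + oy - height_px),
--             (x1 + ox - width_px,  y1 + oy - height_px),
--         ]
--         # chọn candidate gần nhất với điểm trước
--         best = min(candidates, key=lambda p: (p[0]-x0)**2 + (p[1]-y0)**2)
--         unwrapped.append(best)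
--         # cập nhật offset tích lũy theo lựa chọn tốt nhất
--         ox += best[0] - (x1 + ox)
--         oy += best[1] - (y1 + oy)
--     return unwrapped
-- ===== SOURCE B (Python) =====
-- def _axis_shift(d, span):
--     # first-minimal shift among (0, +span, -span) for squared distance (d+s)**2
--     best, bk = 0, d * d
--     for s in (span, -span):
--         k = (d + s) ** 2
--         if k < bk:
--             best, bk = s, k
--     return best
--
--
-- def unwrap_points(points, width_px, height_px):
--     # Per-axis choice: pick the x-shift and y-shift independently (the squared
--     # 2-D distance separates into the two axes), instead of enumerating the
--     # 3x3 Cartesian product of candidates.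
--     if not points:
--         return points
--     out = [points[0]]
--     x0, y0 = points[0]
--     ox = oy = 0
--     for x1, y1 in points[1:]:
--         ox += _axis_shift(x1 + ox - x0, width_px)
--         oy += _axis_shift(y1 + oy - y0, height_px)
--         x0, y0 = x1 + ox, y1 + oy
--         out.append((x0, y0))
--     return out
-- ===== Notes on version B (the rewrite author's own statement) =====
-- stated objective: alternative
-- what changed: Replaces the 9-candidate Cartesian enumeration and single 2-D squared-distance min per step with two independent per-axis 3-way shift choices (the squared distance separates by axis), appending points front-to-back.
import Mathlib
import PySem

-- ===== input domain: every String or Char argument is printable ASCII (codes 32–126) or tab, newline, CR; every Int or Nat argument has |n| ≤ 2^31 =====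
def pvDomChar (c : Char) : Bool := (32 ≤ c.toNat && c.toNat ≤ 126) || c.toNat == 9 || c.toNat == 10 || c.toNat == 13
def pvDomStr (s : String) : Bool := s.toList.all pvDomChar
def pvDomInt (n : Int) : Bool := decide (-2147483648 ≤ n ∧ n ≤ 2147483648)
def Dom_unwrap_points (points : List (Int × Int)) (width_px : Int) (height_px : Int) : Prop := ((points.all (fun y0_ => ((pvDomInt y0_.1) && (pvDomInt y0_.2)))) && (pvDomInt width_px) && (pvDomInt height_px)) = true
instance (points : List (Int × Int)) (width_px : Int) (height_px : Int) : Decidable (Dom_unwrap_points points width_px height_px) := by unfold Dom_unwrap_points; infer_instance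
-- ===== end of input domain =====

-- B separates the per-axis shift choice (x and y independently) instead of A's
-- 3x3 candidate enumeration with a single 2-D squared-distance min; objective: simpler.

-- ===== PORT A =====
def unwrap_points (points : List (Int × Int)) (width_px : Int) (height_px : Int) : List (Int × Int) :=
  match points with
  | [] => points
  | p0 :: rest =>
    -- unwrapped = [points[0]]; ox, oy = 0, 0; for i in range(1, len(points)): body
    let st := rest.foldl (fun (st : List (Int × Int) × Int × Int) pt =>
      let unwrapped := st.1
      let ox := st.2.1
      let oy := st.2.2
      -- x0, y0 = unwrapped[-1]
      let last := (PySem.List.pyGet? unwrapped (-1)).getD (0, 0)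
      let x0 := last.1
      let y0 := last.2
      let x1 := pt.1
      let y1 := pt.2
      let candidates : List (Int × Int) :=
        [ (x1 + ox,            y1 + oy),
          (x1 + ox + width_px, y1 + oy),
          (x1 + ox - width_px, y1 + oy),
          (x1 + ox,            y1 + oy + height_px),
          (x1 + ox,            y1 + oy - height_px),
          (x1 + ox + width_px, y1 + oy + height_px),
          (x1 + ox - width_px, y1 + oy + height_px),
          (x1 + ox + width_px, y1 + oy - height_px),
          (x1 + ox - width_px, y1 + oy - height_px) ]
      match PySem.List.min? candidates (fun p => (p.1 - x0) ^ 2 + (p.2 - y0) ^ 2) with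
      | some best =>
          (unwrapped ++ [best], ox + (best.1 - (x1 + ox)), oy + (best.2 - (y1 + oy)))
      | none => st   -- unreachable: candidates is nonempty
      ) ([p0], 0, 0)
    st.1

-- ===== PORT B =====
-- first-minimal shift among (0, +span, -span) for squared distance (d+s)^2
def axis_shift (d span : Int) : Int :=
  let b0 : Int × Int := (0, d * d)
  let b1 := if (d + span) ^ 2 < b0.2 then (span, (d + span) ^ 2) else b0
  let b2 := if (d - span) ^ 2 < b1.2 then (-span, (d - span) ^ 2) else b1
  b2.1

def unwrap_go (x0 y0 : Int) (rest : List (Int × Int)) (ox oy width_px height_px : Int) :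
    List (Int × Int) :=
  match rest with
  | [] => []
  | (x1, y1) :: t =>
    let ox' := ox + axis_shift (x1 + ox - x0) width_px
    let oy' := oy + axis_shift (y1 + oy - y0) height_px
    (x1 + ox', y1 + oy') :: unwrap_go (x1 + ox') (y1 + oy') t ox' oy' width_px height_px

def unwrap_points_alt (points : List (Int × Int)) (width_px : Int) (height_px : Int) : List (Int × Int) :=
  match points with
  | [] => points
  | (x0, y0) :: rest => (x0, y0) :: unwrap_go x0 y0 rest 0 0 width_px height_px

-- ===== PRECONDITION & SPEC =====
def Spec_unwrap_points (points : List (Int × Int)) (width_px : Int) (height_px : Int) (out : List (Int × Int)) : Prop := out = unwrap_points_alt points width_px height_px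
instance (points : List (Int × Int)) (width_px : Int) (height_px : Int) (out : List (Int × Int)) : Decidable (Spec_unwrap_points points width_px height_px out) := by unfold Spec_unwrap_points; infer_instance

-- ===== CLAIM (what is proved, stated in full; the proofs are below) =====
def Claim_equal_unwrap_points : Prop := ∀ (points : List (Int × Int)) (width_px : Int) (height_px : Int), Dom_unwrap_points points width_px height_px → Spec_unwrap_points points width_px height_px (unwrap_points points width_px height_px)

-- ===== LEMMAS AND PROOFS =====

-- Python's min with key on a nonempty list is a plain running-minimum fold.
lemma min?_cons {α : Type} (k : α → Int) (c : α) (t : List α) :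
    PySem.List.min? (c :: t) k =
      some (t.foldl (fun m x => if k x < k m then x else m) c) := by
  suffices h : ∀ (t : List α) (c : α),
      List.foldl (fun acc x => match acc with
        | none => some x
        | some m => if k x < k m then some x else some m) (some c) t
      = some (t.foldl (fun m x => if k x < k m then x else m) c) by
    simpa [PySem.List.min?, List.foldl] using h t c
  intro t
  induction t with
  | nil => intro c; simp [List.foldl]
  | cons x t ih =>
      intro c
      simp only [List.foldl]
      by_cases hx : k x < k c <;> simp [hx, ih]

-- first-minimal choice among three keyed values, tie order 0, 1, 2
def pick3 (A0 A1 A2 u0 u1 u2 : Int) : Int :=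
  if A1 < A0 then (if A2 < A1 then u2 else u1) else (if A2 < A0 then u2 else u0)

-- The 9-candidate first-minimum with separable key A_i + B_j factorises into
-- two independent 3-way first-minimal choices (A's candidate order vs the
-- axis tie order 0, +, -).
set_option maxHeartbeats 8000000 in
lemma pick9 (k : Int × Int → Int) (u0 u1 u2 v0 v1 v2 A0 A1 A2 B0 B1 B2 : Int)
    (h00 : k (u0, v0) = A0 + B0) (h10 : k (u1, v0) = A1 + B0) (h20 : k (u2, v0) = A2 + B0)
    (h01 : k (u0, v1) = A0 + B1) (h02 : k (u0, v2) = A0 + B2)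
    (h11 : k (u1, v1) = A1 + B1) (h21 : k (u2, v1) = A2 + B1)
    (h12 : k (u1, v2) = A1 + B2) (h22 : k (u2, v2) = A2 + B2) :
    List.foldl (fun m x => if k x < k m then x else m) (u0, v0)
      [(u1, v0), (u2, v0), (u0, v1), (u0, v2), (u1, v1), (u2, v1), (u1, v2), (u2, v2)]
    = (pick3 A0 A1 A2 u0 u1 u2, pick3 B0 B1 B2 v0 v1 v2) := by
  simp only [List.foldl]
  split_ifs <;> simp_all only [h00, h10, h20, h01, h02, h11, h21, h12, h22, pick3] <;>
    first | rfl | omega | (split_ifs <;> first | rfl | omega)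

lemma axis_shift_pick3 (x0 X s : Int) :
    X + axis_shift (X - x0) s
      = pick3 ((X - x0) ^ 2) ((X + s - x0) ^ 2) ((X - s - x0) ^ 2) X (X + s) (X - s) := by
  have e0 : (X - x0) * (X - x0) = (X - x0) ^ 2 := by ring
  have e1 : (X - x0 + s) ^ 2 = (X + s - x0) ^ 2 := by ring
  have e2 : (X - x0 - s) ^ 2 = (X - s - x0) ^ 2 := by ring
  simp only [axis_shift, pick3, e0, e1, e2]
  split_ifs <;> ring

-- One loop iteration of A's 9-way min equals B's two per-axis choices.
lemma step_min (x0 y0 X Y w h : Int) :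
    PySem.List.min?
      [ (X, Y), (X + w, Y), (X - w, Y), (X, Y + h), (X, Y - h),
        (X + w, Y + h), (X - w, Y + h), (X + w, Y - h), (X - w, Y - h) ]
      (fun p => (p.1 - x0) ^ 2 + (p.2 - y0) ^ 2)
    = some (X + axis_shift (X - x0) w, Y + axis_shift (Y - y0) h) := by
  rw [min?_cons]
  rw [pick9 (fun p => (p.1 - x0) ^ 2 + (p.2 - y0) ^ 2) X (X + w) (X - w) Y (Y + h) (Y - h)
      ((X - x0) ^ 2) ((X + w - x0) ^ 2) ((X - w - x0) ^ 2)
      ((Y - y0) ^ 2) ((Y + h - y0) ^ 2) ((Y - h - y0) ^ 2)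
      rfl rfl rfl rfl rfl rfl rfl rfl rfl]
  rw [axis_shift_pick3 x0 X w, axis_shift_pick3 y0 Y h]

-- A's loop body, as it appears in the port
def astep (width_px height_px : Int) (st : List (Int × Int) × Int × Int) (pt : Int × Int) :
    List (Int × Int) × Int × Int :=
  let unwrapped := st.1
  let ox := st.2.1
  let oy := st.2.2
  let last := (PySem.List.pyGet? unwrapped (-1)).getD (0, 0)
  let x0 := last.1
  let y0 := last.2
  let x1 := pt.1
  let y1 := pt.2
  let candidates : List (Int × Int) :=
    [ (x1 + ox,            y1 + oy),
      (x1 + ox + width_px, y1 + oy),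
      (x1 + ox - width_px, y1 + oy),
      (x1 + ox,            y1 + oy + height_px),
      (x1 + ox,            y1 + oy - height_px),
      (x1 + ox + width_px, y1 + oy + height_px),
      (x1 + ox - width_px, y1 + oy + height_px),
      (x1 + ox + width_px, y1 + oy - height_px),
      (x1 + ox - width_px, y1 + oy - height_px) ]
  match PySem.List.min? candidates (fun p => (p.1 - x0) ^ 2 + (p.2 - y0) ^ 2) with
  | some best =>
      (unwrapped ++ [best], ox + (best.1 - (x1 + ox)), oy + (best.2 - (y1 + oy)))
  | none => st

-- Loop invariant: A's fold, started from any accumulator whose last element is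
-- (x0, y0), appends exactly B's tail.
lemma loop_eq (w h : Int) (rest : List (Int × Int)) :
    ∀ (acc : List (Int × Int)) (x0 y0 ox oy : Int),
      PySem.List.pyGet? acc (-1) = some (x0, y0) →
      (rest.foldl (astep w h) (acc, ox, oy)).1 = acc ++ unwrap_go x0 y0 rest ox oy w h := by
  induction rest with
  | nil => intro acc x0 y0 ox oy _; simp [unwrap_go]
  | cons pt t ih =>
      intro acc x0 y0 ox oy hlast
      obtain ⟨x1, y1⟩ := pt
      have hstep : astep w h (acc, ox, oy) (x1, y1)
          = (acc ++ [(x1 + ox + axis_shift (x1 + ox - x0) w,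
                      y1 + oy + axis_shift (y1 + oy - y0) h)],
             ox + axis_shift (x1 + ox - x0) w,
             oy + axis_shift (y1 + oy - y0) h) := by
        simp only [astep, hlast, Option.getD_some]
        rw [step_min x0 y0 (x1 + ox) (y1 + oy) w h]
        simp only [Prod.mk.injEq]
        refine ⟨?_, ?_, ?_⟩ <;> first | trivial | rfl | ring
      simp only [List.foldl, hstep]
      rw [ih _ _ _ _ _ (PySem.List.pyGet?_neg_one_append_singleton _ _)]
      simp [unwrap_go, add_assoc]

-- ===== VERDICT (by name: the statement is the Claim_ definition above) =====
theorem unwrap_points_spec : Claim_equal_unwrap_points := by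
  intro points w h _
  unfold Spec_unwrap_points
  match points with
  | [] => rfl
  | (x0, y0) :: rest =>
      rw [show unwrap_points ((x0, y0) :: rest) w h
            = (rest.foldl (astep w h) ([(x0, y0)], 0, 0)).1 from rfl]
      rw [loop_eq w h rest [(x0, y0)] x0 y0 0 0
            (by simp [PySem.List.pyGet?_neg_one])]
      rfl
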